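-- pv_equiv track=rewrite | github.com/deaxparadox/ArtOf | ArtOfPython/100-examples/questions/question.py | diff_adj_char
-- ===== SOURCE A (Python) =====
-- def diff_adj_char(s: str) -> bool:
--     s_list = [x for x in s]
--     i = 0
--     while i < len(s_list)-1:
--         if s_list[i] != s_list[i+1]:
--             return True
--         i += 1
--     return False
-- ===== SOURCE B (Python) =====
-- def diff_adj_char(s: str) -> bool:
--     return len(set(s)) > 1
-- ===== Notes on version B (the rewrite author's own statement) =====
-- stated objective: idiomatic
-- what changed: Replaced the indexed while-loop over adjacent character pairs with a single set construction: some adjacent pair differs iff the string has more than one distinct character.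
import Mathlib
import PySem

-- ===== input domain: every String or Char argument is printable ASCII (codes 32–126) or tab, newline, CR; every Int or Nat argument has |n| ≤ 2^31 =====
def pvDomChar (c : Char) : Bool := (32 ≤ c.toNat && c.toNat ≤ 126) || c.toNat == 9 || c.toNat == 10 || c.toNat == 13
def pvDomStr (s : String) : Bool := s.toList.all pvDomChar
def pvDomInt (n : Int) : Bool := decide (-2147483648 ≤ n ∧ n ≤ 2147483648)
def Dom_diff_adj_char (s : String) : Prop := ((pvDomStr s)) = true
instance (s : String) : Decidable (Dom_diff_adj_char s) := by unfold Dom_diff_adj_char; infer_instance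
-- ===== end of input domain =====

-- B replaces A's indexed adjacent-pair scan with one set construction: len(set(s)) > 1 (idiomatic).

-- ===== PORT A =====
-- the while loop over i, comparing s_list[i] with s_list[i+1]; termination is structural on the list
def diffAdjLoop : List Char → Bool
  | a :: b :: rest => if a ≠ b then true else diffAdjLoop (b :: rest)
  | _ => false

def diff_adj_char (s : String) : Bool := diffAdjLoop s.toList

-- ===== PORT B =====
def diff_adj_char_alt (s : String) : Bool := decide (1 < PySem.Set.len (PySem.Set.ofList s.toList))

-- ===== PRECONDITION & SPEC =====
def Spec_diff_adj_char (s : String) (out : Bool) : Prop := out = diff_adj_char_alt s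
instance (s : String) (out : Bool) : Decidable (Spec_diff_adj_char s out) := by unfold Spec_diff_adj_char; infer_instance

-- ===== CLAIM (what is proved, stated in full; the proofs are below) =====
def Claim_equal_diff_adj_char : Prop := ∀ (s : String), Dom_diff_adj_char s → Spec_diff_adj_char s (diff_adj_char s)

-- ===== LEMMAS AND PROOFS =====

-- A's loop decides "some element of rest differs from the head a"
theorem diffAdjLoop_eq_decide (a : Char) (rest : List Char) :
    diffAdjLoop (a :: rest) = decide (∃ x ∈ rest, x ≠ a) := by
  induction rest generalizing a with
  | nil => simp [diffAdjLoop]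
  | cons b rest ih =>
    by_cases h : a = b
    · subst h
      simp only [diffAdjLoop, ne_eq, not_true_eq_false, if_false, ih]
      simp
    · simp [diffAdjLoop, h]
      exact Or.inl (fun hba => h hba.symm)

-- a list with two distinct members has more than one element
theorem one_lt_length_of_two_mem {l : List Char} {a x : Char}
    (ha : a ∈ l) (hx : x ∈ l) (hne : x ≠ a) : 1 < l.length := by
  match l with
  | [] => cases ha
  | [y] =>
    simp only [List.mem_singleton] at ha hx
    exact absurd (hx.trans ha.symm) hne
  | _ :: _ :: _ => simp

-- if every element of rest equals a, folding set-add over rest leaves the singleton [a]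
theorem foldl_add_const (a : Char) (rest : List Char) (h : ∀ x ∈ rest, x = a) :
    rest.foldl PySem.Set.add [a] = [a] := by
  induction rest with
  | nil => rfl
  | cons x xs ih =>
    have hx : x = a := h x (List.mem_cons_self ..)
    subst hx
    have hadd : PySem.Set.add [x] x = [x] := by
      simp [PySem.Set.add, PySem.Set.contains]
    rw [List.foldl_cons, hadd]
    exact ih (fun y hy => h y (List.mem_cons_of_mem _ hy))

theorem diff_loop_iff_set (l : List Char) :
    diffAdjLoop l = decide (1 < PySem.Set.len (PySem.Set.ofList l)) := by
  match l with
  | [] => rfl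
  | a :: rest =>
    rw [diffAdjLoop_eq_decide]
    by_cases hall : ∀ x ∈ rest, x = a
    · have h1 : PySem.Set.ofList (a :: rest) = [a] := by
        rw [PySem.Set.ofList_eq_foldl]
        simpa [PySem.Set.add, PySem.Set.contains] using foldl_add_const a rest hall
      have h2 : ¬ (∃ x ∈ rest, ¬ x = a) := by simpa using hall
      have h3 : ¬ ((1 : Int) < PySem.Set.len [a]) := by simp [PySem.Set.len]
      rw [h1, decide_eq_false h2, decide_eq_false h3]
    · obtain ⟨x, hxm, hxa⟩ : ∃ x ∈ rest, ¬ x = a := by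
        by_contra hc
        exact hall (by simpa using hc)
      have ha : a ∈ PySem.Set.ofList (a :: rest) :=
        (PySem.Set.mem_ofList _ _).mpr (List.mem_cons_self ..)
      have hx : x ∈ PySem.Set.ofList (a :: rest) :=
        (PySem.Set.mem_ofList _ _).mpr (List.mem_cons_of_mem _ hxm)
      have hlen : 1 < (PySem.Set.ofList (a :: rest)).length :=
        one_lt_length_of_two_mem ha hx hxa
      have : (1 : Int) < PySem.Set.len (PySem.Set.ofList (a :: rest)) := by
        simpa [PySem.Set.len] using hlen
      rw [decide_eq_true this, decide_eq_true ⟨x, hxm, hxa⟩]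

-- ===== VERDICT (by name: the statement is the Claim_ definition above) =====
theorem diff_adj_char_spec : Claim_equal_diff_adj_char := by
  intro s _
  unfold Spec_diff_adj_char diff_adj_char diff_adj_char_alt
  exact diff_loop_iff_set s.toList
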